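-- pv_equiv track=rewrite | github.com/YotamMeg/PuzzleSolver | puzzle_solver.py | min_seen_rows
-- ===== SOURCE A (Python) =====
-- from typing import List, Tuple, Set, Optional
--
-- Picture = List[List[int]]
--
-- Location = Tuple[int, int]
--
-- WHITE = 1
--
-- def get_picture_scales(picture: Picture) -> Tuple[int, int]:
--     """
--     gets the height and width of a picture - number of rows and columns
--     :param picture: a picture
--     :return: a tuple
--     """
--     height = len(picture)
--     width = len(picture[0])
--     return height, width
--
-- def is_in_picture(rows: int, cols: int, location: Location) -> bool:
--     """
--     receives the number of rows and columns of a picture, and a location (row and col indexes), and checks if it is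
--     inside the picture
--     :param rows: number of rows in the picture
--     :param cols: number of columns in the picture
--     :param location: a tuple containing a location
--     :return: true if the location is inside the picture(including the edges), false if not
--     """
--     if location[0] < 0 or location[0] > rows - 1 or location[1] < 0 or location[1] > cols - 1:
--         return False
--     return True
--
-- def min_seen_rows(picture: Picture, row: int, col: int) -> int:
--     """
--     finds the minimum number of seen cells on the same row given a picture and a location on it
--     :param picture: a picture
--     :param row: row index
--     :param col: column index
--     :return: the number of minimum seen cells
--     """
--     if picture[row][col] != WHITE:
--         return 0
--     height, width = get_picture_scales(picture)
--     cell_counter = 1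
--     for i in range(col - 1, -1, -1):
--         if is_in_picture(height, width, (row, i)):
--             if picture[row][i] != WHITE:
--                 break
--             else:
--                 cell_counter += 1
--     for j in range(col + 1, width):
--         if is_in_picture(height, width, (row, j)):
--             if picture[row][j] != WHITE:
--                 break
--             else:
--                 cell_counter += 1
--     return cell_counter
-- ===== SOURCE B (Python) =====
-- WHITE = 1
--
-- def min_seen_rows(picture, row, col):
--     r = picture[row]
--     if r[col] != WHITE:
--         return 0
--     left, right = -1, len(r)
--     for i, v in enumerate(r):
--         if v != WHITE:
--             if i < col:
--                 left = i
--             elif right == len(r):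
--                 right = i
--     return right - left - 1
-- ===== Notes on version B (the rewrite author's own statement) =====
-- stated objective: alternative
-- what changed: replaces A's two directional counter-with-break loops by a single full pass over the row that records the nearest non-white boundary index on each side of col and returns right - left - 1
-- outside the precondition, e.g. on min_seen_rows([[1, 1]], -1, 0): A returns 1, B returns 2; on min_seen_rows([[1, 1]], 0, -1): A returns 3, B returns 2; on min_seen_rows([[1, 0], [1, 1, 1]], 1, 0): A returns 2, B returns 3
import Mathlib
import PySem

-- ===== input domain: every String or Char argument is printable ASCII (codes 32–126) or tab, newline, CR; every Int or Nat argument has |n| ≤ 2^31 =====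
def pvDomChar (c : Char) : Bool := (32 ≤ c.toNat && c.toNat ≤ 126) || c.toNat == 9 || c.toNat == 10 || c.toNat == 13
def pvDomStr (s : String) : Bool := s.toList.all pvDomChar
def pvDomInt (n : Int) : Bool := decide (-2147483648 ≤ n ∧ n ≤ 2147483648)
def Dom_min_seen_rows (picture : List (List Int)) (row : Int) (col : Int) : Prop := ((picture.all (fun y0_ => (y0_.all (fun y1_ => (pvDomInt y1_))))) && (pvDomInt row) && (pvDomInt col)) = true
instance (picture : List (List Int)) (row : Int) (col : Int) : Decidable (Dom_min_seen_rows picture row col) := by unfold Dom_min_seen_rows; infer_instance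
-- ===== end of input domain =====

-- B replaces A's two directional counter-with-break loops by a single full pass over the row that
-- records the nearest non-white boundary index on each side of col and returns right - left - 1
-- (objective: alternative decomposition, same cost).


-- ===== PORT A =====
-- picture[row][i]; the raising (out-of-range) cases are excluded by Pre_, `.getD` only totalizes
def pvCellA (picture : List (List Int)) (row i : Int) : Int :=
  (PySem.List.pyGet? ((PySem.List.pyGet? picture row).getD []) i).getD 0

-- get_picture_scales; len(picture[0]) raises on an empty picture — excluded by Pre_
def pv_get_picture_scales (picture : List (List Int)) : Int × Int :=
  ((picture.length : Int), (((PySem.List.pyGet? picture 0).getD []).length : Int))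

def pv_is_in_picture (rows cols : Int) (location : Int × Int) : Bool :=
  if location.1 < 0 || location.1 > rows - 1 || location.2 < 0 || location.2 > cols - 1 then
    false
  else true

-- one of A's `for … : if is_in_picture …: if picture[row][i] != WHITE: break else: counter += 1` loops
def pvScanA (picture : List (List Int)) (height width row : Int) :
    List Int → Int → Int
  | [], counter => counter
  | i :: rest, counter =>
    if pv_is_in_picture height width (row, i) then
      if pvCellA picture row i ≠ 1 then counter           -- break
      else pvScanA picture height width row rest (counter + 1)
    else pvScanA picture height width row rest counter

def min_seen_rows (picture : List (List Int)) (row : Int) (col : Int) : Int :=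
  if pvCellA picture row col ≠ 1 then 0
  else
    let hw := pv_get_picture_scales picture
    let c1 := pvScanA picture hw.1 hw.2 row (PySem.List.pyRange (col - 1) (-1) (-1)) 1
    pvScanA picture hw.1 hw.2 row (PySem.List.pyRange (col + 1) hw.2 1) c1

-- ===== PORT B =====
-- the loop body of B's single pass: for i, v in enumerate(r): if v != WHITE: …
def pvStepB (col n : Int) (st : Int × Int) (p : Int × Int) : Int × Int :=
  if p.2 ≠ 1 then
    if p.1 < col then (p.1, st.2)
    else if st.2 == n then (st.1, p.1)
    else st
  else st

def min_seen_rows_alt (picture : List (List Int)) (row : Int) (col : Int) : Int :=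
  match PySem.List.pyGet? picture row with
  | none => 0                                   -- IndexError, excluded by Pre_
  | some r =>
    match PySem.List.pyGet? r col with
    | none => 0                                 -- IndexError, excluded by Pre_
    | some v =>
      if v ≠ 1 then 0
      else
        let n := (r.length : Int)
        let st := (PySem.List.enumerate r 0).foldl (pvStepB col n) (-1, n)
        st.2 - st.1 - 1

-- ===== PRECONDITION & SPEC =====
-- Pre_ admits every valid (possibly negatively wrapping) position whose cell is not WHITE — both
-- implementations return 0 there — and, for a WHITE cell, restricts to the module's natural domain:
-- non-negative indices with the indexed row as long as picture[0]; outside Pre_ A either raises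
-- IndexError or returns counts produced by Python's negative-index wraparound and its
-- len(picture[0])-based is_in_picture guard, which B does not reproduce (see the cited examples).
def Pre_min_seen_rows (picture : List (List Int)) (row : Int) (col : Int) : Prop :=
  PySem.Raise.InRange picture.length row ∧
  PySem.Raise.InRange ((PySem.List.pyGet? picture row).getD []).length col ∧
  ((PySem.List.pyGet? ((PySem.List.pyGet? picture row).getD []) col).getD 0 ≠ 1 ∨
    (0 ≤ row ∧ 0 ≤ col ∧
      ((PySem.List.pyGet? picture row).getD []).length = (picture.headD []).length))

instance (picture : List (List Int)) (row : Int) (col : Int) :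
    Decidable (Pre_min_seen_rows picture row col) := by
  unfold Pre_min_seen_rows; infer_instance

def pvWitness_min_seen_rows : List (List Int) × Int × Int := ([[1, 1], [0, 1]], 0, 1)

def Spec_min_seen_rows (picture : List (List Int)) (row : Int) (col : Int) (out : Int) : Prop :=
  out = min_seen_rows_alt picture row col
instance (picture : List (List Int)) (row : Int) (col : Int) (out : Int) : Decidable (Spec_min_seen_rows picture row col out) := by unfold Spec_min_seen_rows; infer_instance

-- ===== CLAIM (what is proved, stated in full; the proofs are below) =====
def Claim_equal_min_seen_rows : Prop := ∀ (picture : List (List Int)) (row : Int) (col : Int), Dom_min_seen_rows picture row col → Pre_min_seen_rows picture row col → Spec_min_seen_rows picture row col (min_seen_rows picture row col)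

-- ===== LEMMAS AND PROOFS =====

-- A's scan-with-break adds the length of the leading white run of the visited cells,
-- provided every visited index passes the is_in_picture guard.
lemma pvScanA_eq (picture : List (List Int)) (h w row : Int) (idxs : List Int) (c : Int)
    (hin : ∀ i ∈ idxs, pv_is_in_picture h w (row, i) = true) :
    pvScanA picture h w row idxs c
      = c + (((idxs.map (pvCellA picture row)).takeWhile (fun v => v == 1)).length : Int) := by
  induction idxs generalizing c with
  | nil => simp [pvScanA]
  | cons i rest ih =>
    have hi : pv_is_in_picture h w (row, i) = true := hin i (by simp)
    by_cases hc : pvCellA picture row i = 1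
    · have := ih (c + 1) (fun j hj => hin j (by simp [hj]))
      simp [pvScanA, hi, hc, this]
      omega
    · simp [pvScanA, hi, hc]

-- picture[0] written through pyGet? is the head of the list
lemma hpg0_aux (picture : List (List Int)) :
    (PySem.List.pyGet? picture 0).getD [] = picture.headD [] := by
  cases picture with
  | nil => rfl
  | cons a l => rw [PySem.List.pyGet?_zero_cons]; rfl

-- B's pass over cells strictly left of col: `right` is untouched, `left` ends at the last
-- blocker's index — s + len - 1 - (trailing white run), or the initial value if the run covers l.
lemma pvFoldB_left (col n s : Int) (l : List Int) (hlt : s + l.length ≤ col) (a b : Int) :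
    (PySem.List.enumerate l s).foldl (pvStepB col n) (a, b)
      = ((if (l.reverse.takeWhile (fun v => v == 1)).length = l.length then a
          else s + l.length - 1 - ((l.reverse.takeWhile (fun v => v == 1)).length : Int)), b) := by
  induction l using List.reverseRecOn generalizing a with
  | nil => simp
  | append_singleton l x ih =>
    rw [PySem.List.enumerate_append, List.foldl_append]
    have hlen : s + (l.length : Int) < col := by simp at hlt; omega
    by_cases hx : x = 1
    · rw [ih (by omega)]
      have hstep : ∀ st : Int × Int,
          (PySem.List.enumerate [x] (s + (l.length : Int))).foldl (pvStepB col n) st = st := by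
        intro st
        simp [PySem.List.enumerate_cons, PySem.List.enumerate_nil, pvStepB, hx]
      rw [hstep]
      simp [List.reverse_append, hx]
      split_ifs <;> simp_all <;> omega
    · rw [ih (by omega)]
      have hstep : ∀ st : Int × Int,
          (PySem.List.enumerate [x] (s + (l.length : Int))).foldl (pvStepB col n) st
            = (s + (l.length : Int), st.2) := by
        intro st
        simp [PySem.List.enumerate_cons, PySem.List.enumerate_nil, pvStepB, hx, hlen]
      rw [hstep]
      simp [List.reverse_append, hx]
      omega

-- B's pass over cells strictly right of col starting with right = n: once `right` is set it is
-- < n, so it keeps the FIRST blocker's index.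
lemma pvFoldB_right_const (col n : Int) (l : List Int) (s a b : Int)
    (hgt : col < s) (hb : b ≠ n) :
    (PySem.List.enumerate l s).foldl (pvStepB col n) (a, b) = (a, b) := by
  induction l generalizing s with
  | nil => simp
  | cons v l ih =>
    rw [PySem.List.enumerate_cons, List.foldl_cons]
    have : pvStepB col n (a, b) (s, v) = (a, b) := by
      by_cases hv : v = 1 <;>
        simp [pvStepB, hv, not_lt.mpr (le_of_lt hgt), hb]
    rw [this]; exact ih (s + 1) (by omega)

lemma pvFoldB_right (col n s : Int) (l : List Int) (hgt : col < s)
    (hle : s + l.length ≤ n) (a : Int) :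
    (PySem.List.enumerate l s).foldl (pvStepB col n) (a, n)
      = (a, (if (l.takeWhile (fun v => v == 1)).length = l.length then n
             else s + ((l.takeWhile (fun v => v == 1)).length : Int))) := by
  induction l generalizing s with
  | nil => simp
  | cons v l ih =>
    rw [PySem.List.enumerate_cons, List.foldl_cons]
    by_cases hv : v = 1
    · have hstep : pvStepB col n (a, n) (s, v) = (a, n) := by simp [pvStepB, hv]
      rw [hstep, ih (s + 1) (by omega) (by simp at hle ⊢; omega)]
      simp [hv]
      split_ifs <;> simp_all <;> omega
    · have hstep : pvStepB col n (a, n) (s, v) = (a, s) := by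
        simp [pvStepB, hv, not_lt.mpr (le_of_lt hgt)]
      rw [hstep, pvFoldB_right_const col n l (s + 1) a s (by omega) (by simp at hle; omega)]
      simp [hv]

-- ===== VERDICT (by name: the statement is the Claim_ definition above) =====
theorem min_seen_rows_spec : Claim_equal_min_seen_rows := by
  intro picture row col _ hpre
  obtain ⟨hinRow, hinCol, hcase⟩ := hpre
  unfold Spec_min_seen_rows
  cases hgr : PySem.List.pyGet? picture row with
  | none => exact absurd ((PySem.List.pyGet?_eq_none_iff _ _).mp hgr) (not_not_intro hinRow)
  | some r =>
  rw [hgr] at hinCol hcase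
  simp only [Option.getD_some] at hinCol hcase
  cases hgc : PySem.List.pyGet? r col with
  | none => exact absurd ((PySem.List.pyGet?_eq_none_iff _ _).mp hgc) (not_not_intro hinCol)
  | some v =>
  rw [hgc] at hcase
  simp only [Option.getD_some] at hcase
  have hcellv : pvCellA picture row col = v := by
    rw [pvCellA, hgr, Option.getD_some, hgc, Option.getD_some]
  by_cases hv : v = 1
  case neg =>
    simp only [min_seen_rows, min_seen_rows_alt, hgr, hgc, hcellv]
    rw [if_pos hv, if_pos hv]
  case pos =>
  have hnat := hcase.resolve_left (not_not_intro hv)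
  obtain ⟨hr0, hc0, hwr⟩ := hnat
  set R := row.toNat with hR
  set C := col.toNat with hC
  have hrow : row = (R : Int) := by omega
  have hcol : col = (C : Int) := by omega
  have hRlt : R < picture.length := by
    rcases hinRow with ⟨_, h2⟩; omega
  have hrpic : r = picture[R]'hRlt := by
    rw [hrow, PySem.List.pyGet?_natCast, List.getElem?_eq_getElem hRlt] at hgr
    exact (Option.some_inj.mp hgr).symm
  have hClt : C < r.length := by
    rcases hinCol with ⟨_, h2⟩; omega
  have hcell : ∀ (i : Nat) (hi : i < r.length), pvCellA picture row (i : Int) = r[i]'hi := by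
    intro i hi
    rw [pvCellA, hgr, Option.getD_some, PySem.List.pyGet?_natCast,
      List.getElem?_eq_getElem hi, Option.getD_some]
  have hwhite : r[C]'hClt = 1 := by
    rw [hcol, PySem.List.pyGet?_natCast, List.getElem?_eq_getElem hClt] at hgc
    rw [Option.some_inj.mp hgc, hv]
  -- every in-row index passes is_in_picture
  have hin : ∀ i : Int, 0 ≤ i → i < (r.length : Int) →
      pv_is_in_picture (picture.length : Int) ((picture.headD []).length : Int) (row, i) = true := by
    intro i h1 h2
    rw [hwr] at h2
    simp only [pv_is_in_picture]
    rw [if_neg (by simp only [Bool.or_eq_true, decide_eq_true_eq, not_or]; omega)]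
  -- the cells visited by A's left loop are (r.take C).reverse
  have hleft : (PySem.List.pyRange (col - 1) (-1) (-1)).map (pvCellA picture row)
      = (r.take C).reverse := by
    rw [hcol, PySem.List.pyRange_neg_one]
    have hlen : ((C : Int) - 1 - (-1)).toNat = C := by omega
    rw [hlen, List.map_map]
    apply List.ext_getElem
    · simp; omega
    · intro k h1 h2
      simp only [List.getElem_map, List.getElem_range, Function.comp_apply]
      have hk : k < C := by simpa using h1
      have hidx : (C : Int) - 1 - (k : Int) = ((C - 1 - k : Nat) : Int) := by omega
      rw [hidx, hcell (C - 1 - k) (by omega)]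
      rw [List.getElem_reverse, List.getElem_take]
      congr 1
      simp
      omega
  -- the cells visited by A's right loop are r.drop (C+1)
  have hright : (PySem.List.pyRange (col + 1) ((picture.headD []).length : Int) 1).map (pvCellA picture row)
      = r.drop (C + 1) := by
    rw [hcol, PySem.List.pyRange_one, List.map_map]
    have hlen : (((picture.headD []).length : Int) - ((C : Int) + 1)).toNat = r.length - (C + 1) := by
      rw [← hwr]; omega
    rw [hlen]
    apply List.ext_getElem
    · simp
    · intro k h1 h2
      simp only [List.getElem_map, List.getElem_range, Function.comp_apply]
      have hk : k < r.length - (C + 1) := by simpa using h1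
      have hidx : (C : Int) + 1 + (k : Int) = ((C + 1 + k : Nat) : Int) := by omega
      rw [hidx, hcell (C + 1 + k) (by omega)]
      rw [List.getElem_drop]
  have hinL : ∀ i ∈ PySem.List.pyRange (col - 1) (-1) (-1),
      pv_is_in_picture (picture.length : Int) ((picture.headD []).length : Int) (row, i) = true := by
    intro i hi
    rw [hcol, PySem.List.pyRange_neg_one] at hi
    obtain ⟨k, hk, rfl⟩ := List.mem_map.mp hi
    simp only [List.mem_range] at hk
    have hkC : k < ((C : Int) - 1 - (-1)).toNat := hk
    exact hin _ (by omega) (by omega)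
  have hinR2 : ∀ i ∈ PySem.List.pyRange (col + 1) ((picture.headD []).length : Int) 1,
      pv_is_in_picture (picture.length : Int) ((picture.headD []).length : Int) (row, i) = true := by
    intro i hi
    rw [PySem.List.mem_pyRange_one] at hi
    refine hin i (by omega) ?_
    rw [hwr]; omega
  -- name the two white-run lengths
  set L := ((r.take C).reverse.takeWhile (fun v => v == 1)).length with hL
  set Rn := ((r.drop (C + 1)).takeWhile (fun v => v == 1)).length with hRn
  have hLle : L ≤ C := by
    have := (List.takeWhile_prefix (l := (r.take C).reverse) (fun v => v == 1)).length_le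
    simp at this
    omega
  have hRle : Rn ≤ r.length - (C + 1) := by
    have := (List.takeWhile_prefix (l := r.drop (C + 1)) (fun v => v == 1)).length_le
    simp at this
    omega
  -- B's fold over the whole row yields the two boundary indices
  have hsplit : r = r.take C ++ r[C]'hClt :: r.drop (C + 1) := by
    rw [List.getElem_cons_drop, List.take_append_drop]
  have htklen : (r.take C).length = C := by simp; omega
  have hfold : (PySem.List.enumerate r 0).foldl (pvStepB col (r.length : Int)) (-1, (r.length : Int))
      = ((C : Int) - 1 - (L : Int), (C : Int) + 1 + (Rn : Int)) := by
    have henum : PySem.List.enumerate r 0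
        = PySem.List.enumerate (r.take C) 0
          ++ PySem.List.enumerate (r[C]'hClt :: r.drop (C + 1)) (0 + ((r.take C).length : Int)) := by
      conv_lhs => rw [hsplit]
      rw [PySem.List.enumerate_append]
    rw [henum, List.foldl_append]
    rw [pvFoldB_left col (r.length : Int) 0 (r.take C) (by rw [hcol, htklen]; omega) (-1) _]
    rw [PySem.List.enumerate_cons, List.foldl_cons]
    have hid : ∀ st : Int × Int,
        pvStepB col (r.length : Int) st (0 + ((r.take C).length : Int), r[C]'hClt) = st := by
      intro st; simp [pvStepB, hwhite]
    rw [hid]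
    rw [htklen]
    have h01 : (0 : Int) + (C : Int) + 1 = (C : Int) + 1 := by omega
    rw [h01]
    rw [pvFoldB_right col (r.length : Int) ((C : Int) + 1) (r.drop (C + 1))
      (by omega) (by simp; omega) _]
    rw [← hL, ← hRn, List.length_drop]
    have h1 : (if L = C then (-1 : Int) else 0 + (C : Int) - 1 - (L : Int)) = (C : Int) - 1 - (L : Int) := by
      split_ifs with h <;> omega
    have h2 : (if Rn = r.length - (C + 1) then ((r.length : Nat) : Int) else (C : Int) + 1 + (Rn : Int)) = (C : Int) + 1 + (Rn : Int) := by
      split_ifs with h <;> omega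
    rw [h1, h2]
  simp only [min_seen_rows, min_seen_rows_alt, hgr, hgc]
  rw [if_neg (not_not_intro hv), if_neg (by rw [hcellv, hv]; simp)]
  simp only [pv_get_picture_scales, hpg0_aux picture]
  rw [pvScanA_eq _ _ _ _ _ _ hinL, pvScanA_eq _ _ _ _ _ _ hinR2, hleft, hright]
  rw [hfold]
  rw [← hL, ← hRn]
  push_cast
  omega
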